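-- pv_equiv track=rewrite | github.com/cybersecuritytools/easyrecon | utils/merger.py | merge_and_dedupe
-- ===== SOURCE A (Python) =====
-- from typing import List, Dict, Set
--
-- def merge_and_dedupe(results: Dict[str, List[str]]) -> List[str]:
--     """
--     Merge multiple tool result lists and deduplicate.
--
--     Args:
--         results: Dict of tool_name → list of lines
--
--     Returns:
--         Sorted, deduplicated master list
--     """
--     combined: Set[str] = set()
--     for lines in results.values():
--         for line in lines:
--             cleaned = line.strip().lower()
--             if cleaned:
--                 combined.add(cleaned)
--     return sorted(combined)
-- ===== SOURCE B (Python) =====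
-- def merge_and_dedupe(results):
--     """Sort-then-adjacent-scan: collect cleaned lines (duplicates kept), sort,
--     emit each element only when it differs from the last emitted one."""
--     cleaned = sorted(
--         c
--         for lines in results.values()
--         for line in lines
--         if (c := line.strip().lower())
--     )
--     out = []
--     for c in cleaned:
--         if not out or out[-1] != c:
--             out.append(c)
--     return out
-- ===== Notes on version B (the rewrite author's own statement) =====
-- stated objective: alternative
-- what changed: Replaces the hash-set accumulation with collecting all cleaned lines into a plain list, sorting it, and deduplicating by a single adjacent scan (no set is ever built).
import Mathlib
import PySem

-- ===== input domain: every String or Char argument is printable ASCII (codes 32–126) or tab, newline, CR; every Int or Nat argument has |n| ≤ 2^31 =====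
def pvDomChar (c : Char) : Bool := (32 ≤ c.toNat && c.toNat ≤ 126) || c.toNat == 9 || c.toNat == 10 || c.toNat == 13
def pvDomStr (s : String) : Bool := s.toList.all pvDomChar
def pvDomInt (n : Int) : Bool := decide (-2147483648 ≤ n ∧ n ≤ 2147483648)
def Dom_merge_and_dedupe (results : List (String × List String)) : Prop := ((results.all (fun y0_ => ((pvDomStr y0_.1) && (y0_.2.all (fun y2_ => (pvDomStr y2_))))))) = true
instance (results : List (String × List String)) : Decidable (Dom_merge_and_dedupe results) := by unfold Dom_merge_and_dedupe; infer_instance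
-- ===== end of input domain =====

-- B collects every cleaned non-empty line into a plain list, sorts it, and deduplicates
-- with one adjacent scan, instead of A's hash-set accumulation; same return value.

-- ===== PORT A =====
def merge_and_dedupe (results : List (String × List String)) : List String :=
  let combined : PySem.Set String :=
    results.foldl (fun s p =>
      p.2.foldl (fun s line =>
        let cleaned := PySem.Str.lower (PySem.Str.strip line)
        if cleaned ≠ "" then PySem.Set.add s cleaned else s) s) PySem.Set.empty
  PySem.List.sorted combined (fun x => x) false

-- ===== PORT B =====
def merge_and_dedupe_alt (results : List (String × List String)) : List String :=
  let cleaned : List String :=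
    PySem.List.sorted
      ((results.map Prod.snd).flatMap (fun lines =>
        lines.filterMap (fun line =>
          let c := PySem.Str.lower (PySem.Str.strip line)
          if c ≠ "" then some c else none)))
      (fun x => x) false
  cleaned.foldl (fun out c =>
    if out = [] ∨ PySem.List.pyGet? out (-1) ≠ some c then out ++ [c] else out) []

-- ===== PRECONDITION & SPEC =====
def Spec_merge_and_dedupe (results : List (String × List String)) (out : List String) : Prop := out = merge_and_dedupe_alt results
instance (results : List (String × List String)) (out : List String) : Decidable (Spec_merge_and_dedupe results out) := by unfold Spec_merge_and_dedupe; infer_instance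

-- ===== CLAIM (what is proved, stated in full; the proofs are below) =====
def Claim_equal_merge_and_dedupe : Prop := ∀ (results : List (String × List String)), Dom_merge_and_dedupe results → Spec_merge_and_dedupe results (merge_and_dedupe results)

-- ===== LEMMAS AND PROOFS =====

-- B's adjacent-scan step (the lambda in merge_and_dedupe_alt's final loop)
def uniqStep (out : List String) (c : String) : List String :=
  if out = [] ∨ PySem.List.pyGet? out (-1) ≠ some c then out ++ [c] else out

-- in a ≤-sorted list, every element is ≤ the last one
theorem le_getLast_of_pairwise {α : Type} [LinearOrder α] :
    ∀ (acc : List α), acc.Pairwise (· ≤ ·) → ∀ a ∈ acc, ∀ l, acc.getLast? = some l → a ≤ l := by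
  intro acc
  induction acc with
  | nil => simp
  | cons x t ih =>
    intro hp a ha l hl
    rcases List.pairwise_cons.mp hp with ⟨hx, ht⟩
    cases t with
    | nil => simp at hl ha; subst hl; simp [ha]
    | cons y s =>
      rw [List.getLast?_cons_cons] at hl
      rcases List.mem_cons.mp ha with rfl | ha
      · exact hx l (List.mem_of_getLast? hl)
      · exact ih ht a ha l hl

-- the adjacent scan over a ≤-sorted list yields a strictly sorted list with the same members
theorem uniq_scan :
    ∀ (ys acc : List String), acc.Pairwise (· < ·) →
      (∀ a ∈ acc, ∀ y ∈ ys, a ≤ y) → ys.Pairwise (· ≤ ·) →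
      (ys.foldl uniqStep acc).Pairwise (· < ·) ∧
        (∀ x, x ∈ ys.foldl uniqStep acc ↔ x ∈ acc ∨ x ∈ ys) := by
  intro ys
  induction ys with
  | nil => intro acc h1 _ _; exact ⟨h1, by simp⟩
  | cons y t ih =>
    intro acc h1 h2 h3
    rcases List.pairwise_cons.mp h3 with ⟨hy, ht⟩
    have hstep : (uniqStep acc y).Pairwise (· < ·) ∧
        (∀ x, x ∈ uniqStep acc y ↔ x ∈ acc ∨ x = y) ∧
        (∀ a ∈ uniqStep acc y, ∀ z ∈ t, a ≤ z) := by
      unfold uniqStep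
      rw [PySem.List.pyGet?_neg_one]
      split_ifs with hc
      · have key : ∀ a ∈ acc, a < y := by
          intro a ha
          have hay : a ≤ y := h2 a ha y (by simp)
          rcases eq_or_lt_of_le hay with heq | h
          · exfalso
            rcases hc with hnil | hlast
            · simp [hnil] at ha
            · obtain ⟨l, hl⟩ := Option.isSome_iff_exists.mp
                (List.getLast?_isSome.mpr (List.ne_nil_of_mem ha))
              have hal : a ≤ l := le_getLast_of_pairwise acc (h1.imp le_of_lt) a ha l hl
              have hly : l ≤ y := h2 l (List.mem_of_getLast? hl) y (by simp)
              exact hlast (by rw [hl, le_antisymm hly (heq ▸ hal)])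
          · exact h
        refine ⟨?_, by simp, ?_⟩
        · rw [List.pairwise_append]
          refine ⟨h1, by simp, ?_⟩
          intro a ha b hb
          simp at hb
          exact hb ▸ key a ha
        · intro a ha z hz
          rcases List.mem_append.mp ha with ha | ha
          · exact h2 a ha z (by simp [hz])
          · simp at ha; subst ha; exact hy z hz
      · push Not at hc
        obtain ⟨hne, hlast⟩ := hc
        have hyin : y ∈ acc := List.mem_of_getLast? hlast
        refine ⟨h1, ?_, ?_⟩
        · intro x; constructor
          · intro h; exact Or.inl h
          · rintro (h | rfl); exact h; exact hyin
        · intro a ha z hz; exact h2 a ha z (by simp [hz])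
    rw [List.foldl_cons]
    obtain ⟨hs1, hs2, hs3⟩ := hstep
    obtain ⟨r1, r2⟩ := ih (uniqStep acc y) hs1 hs3 ht
    refine ⟨r1, fun x => ?_⟩
    rw [r2 x]
    simp [hs2 x]
    tauto

-- A's inner loop over one value's lines = Set.update with the cleaned, filtered lines
theorem inner_loop_eq_update (f : String → String) (lines : List String) (s : PySem.Set String) :
    lines.foldl (fun s line => if f line ≠ "" then PySem.Set.add s (f line) else s) s
      = PySem.Set.update s (lines.filterMap (fun line => if f line ≠ "" then some (f line) else none)) := by
  induction lines generalizing s with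
  | nil => simp [PySem.Set.update]
  | cons line t ih =>
    rw [List.foldl_cons, List.filterMap_cons]
    by_cases h : f line = ""
    · simp only [h, ne_eq, not_true_eq_false, if_false]
      exact ih s
    · simp only [ne_eq, h, not_false_eq_true, if_true]
      rw [ih]
      simp [PySem.Set.update]

-- A's outer loop = Set.update with the flattened cleaned list
theorem outer_loop_eq_update (f : String → String) (results : List (String × List String))
    (s : PySem.Set String) :
    results.foldl (fun s p =>
        p.2.foldl (fun s line => if f line ≠ "" then PySem.Set.add s (f line) else s) s) s
      = PySem.Set.update s ((results.map Prod.snd).flatMap (fun lines =>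
          lines.filterMap (fun line => if f line ≠ "" then some (f line) else none))) := by
  induction results generalizing s with
  | nil => simp [PySem.Set.update]
  | cons p t ih =>
    rw [List.foldl_cons, List.map_cons, List.flatMap_cons]
    rw [inner_loop_eq_update, ih]
    simp [PySem.Set.update, List.foldl_append]

-- ===== VERDICT (by name: the statement is the Claim_ definition above) =====
theorem merge_and_dedupe_spec : Claim_equal_merge_and_dedupe := by
  intro results _
  unfold Spec_merge_and_dedupe merge_and_dedupe merge_and_dedupe_alt
  simp only []
  set L : List String :=
    (results.map Prod.snd).flatMap (fun lines =>
      lines.filterMap (fun line =>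
        let c := PySem.Str.lower (PySem.Str.strip line)
        if c ≠ "" then some c else none)) with hL
  have hA : results.foldl (fun s p =>
      p.2.foldl (fun s line =>
        let cleaned := PySem.Str.lower (PySem.Str.strip line)
        if cleaned ≠ "" then PySem.Set.add s cleaned else s) s) PySem.Set.empty
      = PySem.Set.ofList L :=
    outer_loop_eq_update (fun line => PySem.Str.lower (PySem.Str.strip line)) results PySem.Set.empty
  rw [hA]
  -- B's scan over ys = sorted L
  set ys : List String := PySem.List.sorted L (fun x => x) false with hys
  have hys_pw : ys.Pairwise (· ≤ ·) := PySem.List.sorted_pairwise L (fun x => x)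
  have hfold : ys.foldl (fun out c =>
      if out = [] ∨ PySem.List.pyGet? out (-1) ≠ some c then out ++ [c] else out) []
      = ys.foldl uniqStep [] := rfl
  rw [hfold]
  obtain ⟨hpw, hmem⟩ := uniq_scan ys [] (by simp) (by simp) hys_pw
  refine PySem.List.sorted_eq_of_perm_of_pairwise_lt (PySem.Set.ofList L) _ (fun x => x) ?_ ?_
  · refine (List.perm_ext_iff_of_nodup (hpw.imp ne_of_lt) (PySem.Set.nodup_ofList L)).mpr ?_
    intro x
    rw [hmem x, PySem.Set.mem_ofList]
    simp [hys, PySem.List.mem_sorted]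
  · exact hpw
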